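-- pv_equiv track=rewrite | github.com/coding-armadillo/kattis | src/mrcodeformatgrader.py | f
-- ===== SOURCE A (Python) =====
-- def f(numbers):
--     prev = numbers[0]
--     ans = {prev: 1}
--     for i in range(1, len(numbers)):
--         if numbers[i] == prev + ans[prev]:
--             ans[prev] += 1
--         else:
--             prev = numbers[i]
--             ans[prev] = 1
--
--     parts = [
--         f"{key}-{key+value-1}"
--         if value > 1
--         else " ".join([str(d) for d in range(key, key + value)])
--         for key, value in ans.items()
--     ]
--
--     return ", ".join(parts[:-1]) + " and " + parts[-1]
-- ===== SOURCE B (Python) =====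
-- def f(numbers):
--     # staged, stateless decomposition: break positions first, then runs from index
--     # arithmetic, then the start-keyed dict (later runs with the same start overwrite).
--     n = len(numbers)
--     bounds = [0] + [i for i in range(1, n) if numbers[i] != numbers[i - 1] + 1] + [n]
--     by_start = {numbers[b]: e - b for b, e in zip(bounds, bounds[1:])}
--     parts = [f"{s}-{s + l - 1}" if l > 1 else str(s) for s, l in by_start.items()]
--     return ", ".join(parts[:-1]) + " and " + parts[-1]
-- ===== Notes on version B (the rewrite author's own statement) =====
-- stated objective: alternative
-- what changed: A detects runs with a stateful single loop that tracks a current start and mutates a dict via ans[prev] lookups; B is stateless and staged: it first computes the break positions by pairwise comparison of adjacent elements, derives each run as (numbers[b], e-b) from consecutive break indices via zip, and builds the start-keyed dict (later runs overwrite) in one comprehension before the shared formatting.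
import Mathlib
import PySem

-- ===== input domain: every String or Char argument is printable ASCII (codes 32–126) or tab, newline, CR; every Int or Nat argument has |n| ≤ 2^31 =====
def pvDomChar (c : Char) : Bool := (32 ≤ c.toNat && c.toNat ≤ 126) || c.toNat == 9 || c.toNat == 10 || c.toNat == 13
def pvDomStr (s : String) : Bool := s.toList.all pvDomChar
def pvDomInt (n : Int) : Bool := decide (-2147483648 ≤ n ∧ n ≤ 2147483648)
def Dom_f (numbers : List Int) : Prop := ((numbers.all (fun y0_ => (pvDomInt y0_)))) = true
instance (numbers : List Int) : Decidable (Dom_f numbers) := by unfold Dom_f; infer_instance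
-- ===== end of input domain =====

-- B replaces A's stateful run-tracking loop (prev pointer + dict mutation) with a
-- stateless staged computation: break positions by pairwise comparison, runs by index
-- arithmetic over zipped consecutive break positions, then the start-keyed dict.
-- Both Pythons raise IndexError on [], excluded by Pre_f.

-- ===== PORT A =====
-- one loop step of A: state (prev, ans), read numbers[i]
def fStepA (st : Int × PySem.Dict Int Int) (y : Int) : Int × PySem.Dict Int Int :=
  if y = st.1 + st.2.getD st.1 0 then (st.1, st.2.insert st.1 (st.2.getD st.1 0 + 1))
  else (y, st.2.insert y 1)

def f (numbers : List Int) : String :=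
  match numbers with
  | [] => ""   -- Python raises IndexError at numbers[0]; excluded by Pre_f
  | x :: _ =>
    let ans := ((PySem.List.pyRange 1 (PySem.List.len numbers) 1).foldl
      (fun st i => fStepA st (PySem.List.pyGetD numbers i 0))
      (x, PySem.Dict.empty.insert x 1)).2
    let parts := ans.items.map (fun kv =>
      if kv.2 > 1 then PySem.Int.toStr kv.1 ++ "-" ++ PySem.Int.toStr (kv.1 + kv.2 - 1)
      else PySem.Str.join " " ((PySem.List.pyRange kv.1 (kv.1 + kv.2) 1).map PySem.Int.toStr))
    PySem.Str.join ", " (PySem.List.slice parts none (some (-1))) ++ " and " ++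
      PySem.List.pyGetD parts (-1) ""

-- ===== PORT B =====
def f_alt (numbers : List Int) : String :=
  let n := PySem.List.len numbers
  let bounds : List Int := [0] ++ ((PySem.List.pyRange 1 n 1).filter
      (fun i => PySem.List.pyGetD numbers i 0 != PySem.List.pyGetD numbers (i - 1) 0 + 1)) ++ [n]
  let byStart := (bounds.zip (PySem.List.slice bounds (some 1) none)).foldl
      (fun d (p : Int × Int) => d.insert (PySem.List.pyGetD numbers p.1 0) (p.2 - p.1))
      PySem.Dict.empty
  let parts := byStart.items.map (fun p =>
      if p.2 > 1 then PySem.Int.toStr p.1 ++ "-" ++ PySem.Int.toStr (p.1 + p.2 - 1)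
      else PySem.Int.toStr p.1)
  PySem.Str.join ", " (PySem.List.slice parts none (some (-1))) ++ " and " ++
    PySem.List.pyGetD parts (-1) ""

-- ===== PRECONDITION & SPEC =====
-- Pre_f excludes only the empty list, on which both Pythons raise IndexError.
def Pre_f (numbers : List Int) : Prop := numbers ≠ []
instance (numbers : List Int) : Decidable (Pre_f numbers) := by unfold Pre_f; infer_instance
def pvWitness_f : List Int := [1, 2, 3, 7]

def Spec_f (numbers : List Int) (out : String) : Prop := out = f_alt numbers
instance (numbers : List Int) (out : String) : Decidable (Spec_f numbers out) := by unfold Spec_f; infer_instance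

-- ===== CLAIM (what is proved, stated in full; the proofs are below) =====
def Claim_equal_f : Prop := ∀ (numbers : List Int), Dom_f numbers → Pre_f numbers → Spec_f numbers (f numbers)

-- ===== LEMMAS AND PROOFS =====

-- proof-only common reference: the list of maximal consecutive runs as (start, length)
def runsOf (s n : Int) : List Int → List (Int × Int)
  | [] => [(s, n)]
  | y :: ys => if y = s + n then runsOf s (n + 1) ys else (s, n) :: runsOf y 1 ys

-- A's fused loop builds the same dict as the runs inserted by start value
theorem key_dict (ys : List Int) (s n : Int) (d : PySem.Dict Int Int) :
    (ys.foldl fStepA (s, d.insert s n)).2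
      = (runsOf s n ys).foldl (fun d (p : Int × Int) => d.insert p.1 p.2) d := by
  induction ys generalizing s n d with
  | nil => simp [runsOf]
  | cons y ys ih =>
    simp only [List.foldl_cons, fStepA, runsOf, PySem.Dict.getD_insert_self]
    by_cases h : y = s + n
    · simp only [if_pos h]
      rw [PySem.Dict.insert_insert_self]
      exact ih s (n + 1) d
    · simp only [if_neg h, List.foldl_cons]
      exact ih y 1 (d.insert s n)

-- every run length is ≥ 1
theorem runsOf_pos (ys : List Int) (s n : Int) (hn : 1 ≤ n) :
    ∀ p ∈ runsOf s n ys, 1 ≤ p.2 := by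
  induction ys generalizing s n with
  | nil => simp [runsOf]; omega
  | cons y ys ih =>
    simp only [runsOf]
    by_cases h : y = s + n
    · simp only [if_pos h]; exact ih s (n + 1) (by omega)
    · simp only [if_neg h]
      intro p hp
      rcases List.mem_cons.mp hp with hp | hp
      · subst hp; exact hn
      · exact ih y 1 le_rfl p hp

-- folding pairs with positive second components keeps all dict values positive
theorem values_pos (l : List (Int × Int)) (d : PySem.Dict Int Int)
    (hl : ∀ p ∈ l, 1 ≤ p.2) (hd : ∀ w ∈ d.values, 1 ≤ w) :
    ∀ w ∈ (l.foldl (fun d (p : Int × Int) => d.insert p.1 p.2) d).values, 1 ≤ w := by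
  induction l generalizing d with
  | nil => simpa using hd
  | cons p l ih =>
    simp only [List.foldl_cons]
    refine ih _ (fun q hq => hl q (List.mem_cons_of_mem _ hq)) ?_
    intro w hw
    rcases PySem.Dict.mem_values_insert _ _ _ _ hw with h | h
    · exact h ▸ hl p (by simp)
    · exact hd w h

-- the two part-formatters agree on pairs with value ≥ 1
theorem fmt_eq (k v : Int) (hv : 1 ≤ v) :
    (if v > 1 then PySem.Int.toStr k ++ "-" ++ PySem.Int.toStr (k + v - 1)
     else PySem.Str.join " " ((PySem.List.pyRange k (k + v) 1).map PySem.Int.toStr))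
      = (if v > 1 then PySem.Int.toStr k ++ "-" ++ PySem.Int.toStr (k + v - 1)
         else PySem.Int.toStr k) := by
  by_cases h : v > 1
  · simp [h]
  · have hv1 : v = 1 := by omega
    subst hv1
    rw [PySem.List.pyRange_one_cons (by omega), PySem.List.pyRange_one_eq_nil (by omega)]
    simp [PySem.Str.join, PySem.Int.toStr]

-- B's pairs of consecutive bound positions, mapped to (start value, length)
def pairsOf (numbers : List Int) (l : List Int) : List (Int × Int) :=
  (l.zip l.tail).map (fun p => (PySem.List.pyGetD numbers p.1 0, p.2 - p.1))

theorem pairsOf_cons_cons (numbers : List Int) (a c : Int) (t : List Int) :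
    pairsOf numbers (a :: c :: t)
      = (PySem.List.pyGetD numbers a 0, c - a) :: pairsOf numbers (c :: t) := by
  simp [pairsOf]

-- the bridge: break positions from offset o onward, zipped and mapped, give runsOf
theorem bridge (numbers : List Int) (xs : List Int) :
    ∀ (b o : Nat) (s n : Int),
      numbers.drop o = xs → b + n.toNat = o → 1 ≤ n → o ≤ numbers.length →
      PySem.List.pyGetD numbers (b : Int) 0 = s →
      PySem.List.pyGetD numbers ((o : Int) - 1) 0 = s + n - 1 →
      pairsOf numbers ((b : Int) ::
          ((PySem.List.pyRange (o : Int) ((numbers.length : Nat) : Int) 1).filter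
            (fun i => PySem.List.pyGetD numbers i 0 != PySem.List.pyGetD numbers (i - 1) 0 + 1))
          ++ [((numbers.length : Nat) : Int)])
        = runsOf s n xs := by
  induction xs with
  | nil =>
    intro b o s n hdrop hbo hn ho hs hlast
    have hlen : numbers.length ≤ o := by
      by_contra hc
      have := List.drop_eq_nil_iff.mp hdrop
      omega
    have ho' : o = numbers.length := by omega
    rw [PySem.List.pyRange_one_eq_nil (by exact_mod_cast le_of_eq ho'.symm)]
    simp only [List.filter_nil]
    simp only [List.singleton_append, pairsOf, List.tail_cons, List.zip_cons_cons,
      List.zip_nil_right, List.map_cons, List.map_nil]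
    rw [hs, runsOf]
    have hlb : ((numbers.length : Nat) : Int) - (b : Int) = n := by omega
    rw [hlb]
  | cons y ys ih =>
    intro b o s n hdrop hbo hn ho hs hlast
    have holt : o < numbers.length := by
      by_contra hc
      have : numbers.drop o = [] := List.drop_eq_nil_iff.mpr (by omega)
      rw [this] at hdrop; exact List.cons_ne_nil y ys hdrop.symm
    have hy : PySem.List.pyGetD numbers (o : Int) 0 = y := by
      have : numbers[o]? = some y := by
        have := hdrop
        rw [List.drop_eq_getElem_cons holt] at this
        simpa using (List.cons_eq_cons.mp this).1 ▸ (List.getElem?_eq_getElem holt)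
      simp [PySem.List.pyGetD_natCast, List.getD, this]
    have hdrop' : numbers.drop (o + 1) = ys := by
      have := hdrop
      rw [List.drop_eq_getElem_cons holt] at this
      have h2 := (List.cons_eq_cons.mp this).2
      simpa [List.drop_drop] using h2
    rw [PySem.List.pyRange_one_cons (by exact_mod_cast holt)]
    rw [List.filter_cons]
    by_cases hcase : y = s + n
    · have hcond : (PySem.List.pyGetD numbers (o : Int) 0
          != PySem.List.pyGetD numbers ((o : Int) - 1) 0 + 1) = false := by
        rw [hy, hlast]
        simp only [bne_eq_false_iff_eq]
        omega
      rw [hcond]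
      simp only [Bool.false_eq_true, if_false]
      have := ih b (o + 1) s (n + 1) hdrop' (by omega) (by omega) (by omega) hs
        (by push_cast; rw [show ((o : Int) + 1 - 1) = (o : Int) by ring, hy]; omega)
      rw [show ((o : Int) + 1) = (((o + 1 : Nat)) : Int) by push_cast; ring]
      rw [this]
      simp [runsOf, hcase]
    · have hcond : (PySem.List.pyGetD numbers (o : Int) 0
          != PySem.List.pyGetD numbers ((o : Int) - 1) 0 + 1) = true := by
        rw [hy, hlast]
        simp only [bne_iff_ne, ne_eq]
        omega
      rw [hcond]
      simp only [if_true, List.cons_append]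
      rw [pairsOf_cons_cons]
      have := ih o (o + 1) y 1 hdrop' (by omega) le_rfl (by omega) hy
        (by push_cast; rw [show ((o : Int) + 1 - 1) = (o : Int) by ring, hy]; omega)
      rw [show ((o : Int) + 1) = (((o + 1 : Nat)) : Int) by push_cast; ring]
      rw [List.cons_append] at this
      rw [this, hs]
      have hob : (o : Int) - (b : Int) = n := by omega
      rw [hob]
      simp [runsOf, hcase]

-- ===== VERDICT (by name: the statement is the Claim_ definition above) =====
theorem f_spec : Claim_equal_f := by
  intro numbers _ hpre
  unfold Spec_f f f_alt
  match numbers, hpre with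
  | x :: xs, _ =>
    simp only
    -- A's range-indexed fold is the fold over the tail
    have hfold : (PySem.List.pyRange 1 (PySem.List.len (x :: xs)) 1).foldl
        (fun st i => fStepA st (PySem.List.pyGetD (x :: xs) i 0))
        (x, PySem.Dict.empty.insert x 1)
        = ((x :: xs).drop 1).foldl fStepA (x, PySem.Dict.empty.insert x 1) := by
      exact PySem.List.foldl_pyRange_pyGetD (xs := x :: xs) (a := 1) (d := 0)
        (f := fStepA) (init := (x, PySem.Dict.empty.insert x 1)) (by omega)
    rw [hfold]
    simp only [List.drop_succ_cons, List.drop_zero]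
    rw [key_dict xs x 1 PySem.Dict.empty]
    -- B's bounds fold is the fold over pairsOf, which is runsOf
    have hbr := bridge (x :: xs) xs 0 1 x 1 (by simp) (by simp) le_rfl (by simp)
      (by simp [PySem.List.pyGetD_zero_cons]) (by norm_num [PySem.List.pyGetD_zero_cons])
    have hlen : PySem.List.len (x :: xs) = (((x :: xs).length : Nat) : Int) := by
      simp [PySem.List.len_eq]
    rw [hlen, PySem.List.slice_from_one]
    have hzip : ∀ (l : List Int),
        (l.zip l.tail).foldl
          (fun d (p : Int × Int) => d.insert (PySem.List.pyGetD (x :: xs) p.1 0) (p.2 - p.1))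
          PySem.Dict.empty
        = (pairsOf (x :: xs) l).foldl
            (fun d (p : Int × Int) => d.insert p.1 p.2) PySem.Dict.empty := by
      intro l
      rw [pairsOf, List.foldl_map]
    simp only [List.cons_append, List.nil_append]
    rw [hzip]
    simp only [Nat.cast_zero, Nat.cast_one] at hbr
    rw [List.cons_append] at hbr
    rw [hbr]
    -- both sides now format the same dict; the formatters agree on values ≥ 1
    have hpos := runsOf_pos xs x 1 le_rfl
    have hvals := values_pos (runsOf x 1 xs) PySem.Dict.empty hpos (by simp [PySem.Dict.empty])
    have hparts : ((runsOf x 1 xs).foldl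
        (fun d (p : Int × Int) => d.insert p.1 p.2) PySem.Dict.empty).items.map (fun kv =>
          if kv.2 > 1 then PySem.Int.toStr kv.1 ++ "-" ++ PySem.Int.toStr (kv.1 + kv.2 - 1)
          else PySem.Str.join " " ((PySem.List.pyRange kv.1 (kv.1 + kv.2) 1).map PySem.Int.toStr))
        = ((runsOf x 1 xs).foldl
        (fun d (p : Int × Int) => d.insert p.1 p.2) PySem.Dict.empty).items.map (fun p =>
          if p.2 > 1 then PySem.Int.toStr p.1 ++ "-" ++ PySem.Int.toStr (p.1 + p.2 - 1)
          else PySem.Int.toStr p.1) := by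
      refine List.map_congr_left ?_
      intro kv hkv
      exact fmt_eq kv.1 kv.2 (hvals kv.2 (by
        simp only [PySem.Dict.values]
        exact List.mem_map.mpr ⟨kv, hkv, rfl⟩))
    rw [hparts]
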